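-- pv_equiv track=rewrite | github.com/harshit158/build-shell-from-scratch | app/main.py | extract_literal_chars
-- ===== SOURCE A (Python) =====
-- def extract_literal_chars(string: str):
--     start = False
--     res = ''
--     for s in string:
--         if s == "'":
--             start = True if not start else False
--             continue
--         if start:
--             res += s
--         else:
--             ...
--     return res
-- ===== SOURCE B (Python) =====
-- def extract_literal_chars(string: str):
--     return ''.join(string.split("'")[1::2])
-- ===== Notes on version B (the rewrite author's own statement) =====
-- stated objective: simpler
-- what changed: Replaces the character-by-character loop with toggled boolean state by splitting on the quote character and joining the odd-indexed segments (split-then-slice).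
import Mathlib
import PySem

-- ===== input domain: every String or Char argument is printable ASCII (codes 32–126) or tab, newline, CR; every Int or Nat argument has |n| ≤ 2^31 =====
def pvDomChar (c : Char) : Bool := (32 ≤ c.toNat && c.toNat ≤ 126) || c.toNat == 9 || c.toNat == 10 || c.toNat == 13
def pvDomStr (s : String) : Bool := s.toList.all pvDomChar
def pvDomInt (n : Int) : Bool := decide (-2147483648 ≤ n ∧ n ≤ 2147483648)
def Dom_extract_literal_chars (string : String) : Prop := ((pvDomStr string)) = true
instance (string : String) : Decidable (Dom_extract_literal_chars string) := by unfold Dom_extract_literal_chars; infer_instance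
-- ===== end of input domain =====

-- B replaces A's char loop with toggled boolean state by split-on-quote + join of odd-indexed segments (simpler decomposition, same cost).

-- ===== PORT A =====
-- loop body: state = (start, res); res += s ported as res ++ [s]
def pvStepA (st : Bool × List Char) (s : Char) : Bool × List Char :=
  if s = '\'' then (if !st.1 then true else false, st.2)
  else if st.1 then (st.1, st.2 ++ [s]) else st

def extract_literal_chars (string : String) : String :=
  String.ofList (string.toList.foldl pvStepA (false, [])).2

-- ===== PORT B =====
-- string.split("'") (sep nonempty, exact) → [1::2] → ''.join
def extract_literal_chars_alt (string : String) : String :=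
  PySem.Str.join ""
    ((PySem.List.slice? ((PySem.Chars.splitOn string.toList "'".toList).map String.ofList)
        (some 1) none 2).getD [])

-- ===== PRECONDITION & SPEC =====
def Spec_extract_literal_chars (string : String) (out : String) : Prop := out = extract_literal_chars_alt string
instance (string : String) (out : String) : Decidable (Spec_extract_literal_chars string out) := by unfold Spec_extract_literal_chars; infer_instance

-- ===== CLAIM (what is proved, stated in full; the proofs are below) =====
def Claim_equal_extract_literal_chars : Prop := ∀ (string : String), Dom_extract_literal_chars string → Spec_extract_literal_chars string (extract_literal_chars string)

-- ===== LEMMAS AND PROOFS =====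

-- recursive characterisation of A's loop
def pvSpecF : List Char → Bool → List Char
  | [], _ => []
  | c :: rest, st =>
    if c = '\'' then pvSpecF rest (!st)
    else if st then c :: pvSpecF rest st else pvSpecF rest st

theorem pvFoldlA (l : List Char) (st : Bool) (res : List Char) :
    (l.foldl pvStepA (st, res)).2 = res ++ pvSpecF l st := by
  induction l generalizing st res with
  | nil => simp [pvSpecF]
  | cons c rest ih =>
    rw [List.foldl_cons]
    by_cases hc : c = '\''
    · cases st
      · rw [show pvStepA (false, res) c = (true, res) by simp [pvStepA, hc], ih]
        simp [pvSpecF, hc]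
      · rw [show pvStepA (true, res) c = (false, res) by simp [pvStepA, hc], ih]
        simp [pvSpecF, hc]
    · cases st
      · rw [show pvStepA (false, res) c = (false, res) by simp [pvStepA, hc], ih]
        simp [pvSpecF, hc]
      · rw [show pvStepA (true, res) c = (true, res ++ [c]) by simp [pvStepA, hc], ih]
        simp [pvSpecF, hc]

-- pure recursive form of PySem.Chars.splitOn on a single-char separator
def pvSp : List Char → List (List Char)
  | [] => [[]]
  | c :: rest =>
    if c = '\'' then [] :: pvSp rest
    else
      match pvSp rest with
      | [] => [[c]]
      | h :: t => (c :: h) :: t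

theorem pvSp_ne_nil (l : List Char) : pvSp l ≠ [] := by
  cases l with
  | nil => simp [pvSp]
  | cons c rest =>
    simp only [pvSp]
    split
    · simp
    · split <;> simp

theorem pvGo_eq (l : List Char) (fuel : Nat) (cur : List Char) (acc : List (List Char))
    (h : l.length ≤ fuel) :
    PySem.Chars.splitOn.go ['\''] fuel l cur acc =
      acc.reverse ++
        (match pvSp l with
         | [] => [cur.reverse]
         | h :: t => (cur.reverse ++ h) :: t) := by
  induction l generalizing fuel cur acc with
  | nil =>
    cases fuel <;> simp [PySem.Chars.splitOn.go, pvSp]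
  | cons c rest ih =>
    cases fuel with
    | zero => simp at h
    | succ f =>
      simp only [List.length_cons, Nat.succ_le_succ_iff] at h
      by_cases hc : c = '\''
      · subst hc
        rw [show PySem.Chars.splitOn.go ['\''] (f+1) ('\'' :: rest) cur acc =
              PySem.Chars.splitOn.go ['\''] f (List.drop 1 ('\'' :: rest)) [] (cur.reverse :: acc) by
            simp [PySem.Chars.splitOn.go, List.isPrefixOf]]
        rw [List.drop_one, List.tail_cons, ih f [] (cur.reverse :: acc) h]
        cases hsp : pvSp rest with
        | nil => exact absurd hsp (pvSp_ne_nil rest)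
        | cons h' t' => simp [pvSp, hsp]
      · rw [show PySem.Chars.splitOn.go ['\''] (f+1) (c :: rest) cur acc =
              PySem.Chars.splitOn.go ['\''] f rest (c :: cur) acc by
            simp only [PySem.Chars.splitOn.go, List.isPrefixOf, Bool.and_true]
            rw [if_neg (by simpa using fun hq => hc hq.symm)]]
        rw [ih f (c :: cur) acc h]
        cases hsp : pvSp rest with
        | nil => exact absurd hsp (pvSp_ne_nil rest)
        | cons h' t' => simp [pvSp, hsp, hc]

theorem pvSplitOn_eq (l : List Char) : PySem.Chars.splitOn l ['\''] = pvSp l := by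
  rw [PySem.Chars.splitOn, pvGo_eq l (l.length + 1) [] [] (by omega)]
  cases hsp : pvSp l with
  | nil => exact absurd hsp (pvSp_ne_nil l)
  | cons h t => simp

-- even/odd-indexed sublists
def pvEvens {α : Type} : List α → List α
  | [] => []
  | [a] => [a]
  | a :: _ :: t => a :: pvEvens t

def pvOdds {α : Type} (l : List α) : List α := pvEvens l.tail

theorem pvEvens_cons {α : Type} (a : α) (t : List α) :
    pvEvens (a :: t) = a :: pvOdds t := by
  cases t <;> simp [pvEvens, pvOdds]

-- A's loop result = flatten of the even/odd segments of pvSp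
theorem pvSpecF_flatten (l : List Char) :
    pvSpecF l false = (pvOdds (pvSp l)).flatten ∧
    pvSpecF l true = (pvEvens (pvSp l)).flatten := by
  induction l with
  | nil => simp [pvSpecF, pvSp, pvOdds, pvEvens]
  | cons c rest ih =>
    by_cases hc : c = '\''
    · subst hc
      constructor
      · rw [show pvSpecF ('\'' :: rest) false = pvSpecF rest true by simp [pvSpecF], ih.2]
        simp [pvSp, pvOdds]
      · rw [show pvSpecF ('\'' :: rest) true = pvSpecF rest false by simp [pvSpecF], ih.1]
        simp [pvSp, pvEvens_cons]
    · cases hsp : pvSp rest with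
      | nil => exact absurd hsp (pvSp_ne_nil rest)
      | cons h t =>
        simp only [pvSpecF, if_neg hc, pvSp, hsp]
        constructor
        · rw [(by simpa [hsp] using ih.1 : pvSpecF rest false = (pvOdds (h :: t)).flatten)]
          simp [pvOdds]
        · rw [(by simpa [hsp] using ih.2 : pvSpecF rest true = (pvEvens (h :: t)).flatten)]
          rw [pvEvens_cons, pvEvens_cons]
          simp

-- [1::2] is pvOdds
theorem pvFilterMap_odds {α : Type} (xs : List α) :
    (List.range (xs.length / 2)).filterMap (fun k => xs[1 + 2 * k]?) = pvOdds xs := by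
  match xs with
  | [] => simp [pvOdds, pvEvens]
  | [a] => simp [pvOdds, pvEvens]
  | a :: b :: t =>
    have hlen : (a :: b :: t).length / 2 = t.length / 2 + 1 := by
      simp only [List.length_cons]; omega
    rw [hlen, List.range_succ_eq_map, List.filterMap_cons, List.filterMap_map]
    have h0 : (a :: b :: t)[1 + 2 * 0]? = some b := by simp
    rw [h0]
    have hrec : (List.range (t.length / 2)).filterMap
        ((fun k => (a :: b :: t)[1 + 2 * k]?) ∘ Nat.succ) =
        (List.range (t.length / 2)).filterMap (fun k => t[1 + 2 * k]?) := by
      apply List.filterMap_congr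
      intro k _
      have : 1 + 2 * (k + 1) = (1 + 2 * k) + 2 := by omega
      simp [Function.comp, this]
    rw [hrec, pvFilterMap_odds t]
    simp [pvOdds, pvEvens_cons]

theorem pvSlice_odds {α : Type} (xs : List α) :
    PySem.List.slice? xs (some 1) none 2 = some (pvOdds xs) := by
  rw [PySem.List.slice?, if_neg (by norm_num)]
  simp only [PySem.List.sliceIndices]
  norm_num
  cases xs with
  | nil => norm_num [pvOdds, pvEvens]
  | cons a t =>
    have h1 : min (1:Int) ((a :: t).length : Int) = 1 := by
      have : (1:Int) ≤ ((a :: t).length : Int) := by simp [List.length_cons]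
      omega
    rw [h1]
    have hcount : (if 1 < (a :: t).length then
        ((((a :: t).length : Int) - 1 + 2 - 1) / 2).toNat else 0) = (a :: t).length / 2 := by
      by_cases h : 1 < (a :: t).length
      · rw [if_pos h]
        have : (((a :: t).length : Int) - 1 + 2 - 1) = ((a :: t).length : Int) := by ring
        rw [this]; omega
      · rw [if_neg h]
        have : (a :: t).length = 1 := by simp only [List.length_cons] at h ⊢; omega
        simp [this]
    rw [hcount, ← pvFilterMap_odds (a :: t)]
    apply List.filterMap_congr
    intro k _
    have : ((1:Int) + 2 * (k:Int)).toNat = 1 + 2 * k := by omega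
    rw [this]

-- intercalate with empty separator is flatten
theorem pvJoin_nil (xss : List (List Char)) : PySem.Chars.join [] xss = xss.flatten := by
  rw [PySem.Chars.join]
  induction xss with
  | nil => simp [List.intercalate]
  | cons h t ih =>
    cases t with
    | nil => simp [List.intercalate]
    | cons h' t' =>
      simp only [List.intercalate] at ih ⊢
      simp_all [List.intersperse]

theorem pvEvensMap (l : List (List Char)) :
    (pvEvens (l.map String.ofList)).map String.toList = pvEvens l := by
  match l with
  | [] => simp [pvEvens]
  | [a] => simp [pvEvens]
  | a :: b :: t => simp [pvEvens, pvEvensMap t]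

theorem pvOddsMap (l : List (List Char)) :
    (pvOdds (l.map String.ofList)).map String.toList = pvOdds l := by
  cases l with
  | nil => simp [pvOdds, pvEvens]
  | cons a t => simp only [pvOdds, List.map_cons, List.tail_cons]; exact pvEvensMap t

-- ===== VERDICT (by name: the statement is the Claim_ definition above) =====
theorem extract_literal_chars_spec : Claim_equal_extract_literal_chars := by
  intro s _
  unfold Spec_extract_literal_chars extract_literal_chars extract_literal_chars_alt
  rw [pvFoldlA]
  rw [show ("'" : String).toList = ['\''] from rfl]
  rw [pvSplitOn_eq, pvSlice_odds, Option.getD_some]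
  rw [PySem.Str.join]
  rw [show ("" : String).toList = ([] : List Char) from rfl]
  rw [pvJoin_nil, List.nil_append, (pvSpecF_flatten s.toList).1, pvOddsMap]
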